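-- pv_equiv track=rewrite | github.com/astrinleonid/PyCharm | PycharmProjects/AssignP14/main.py | part4_get_str_mult_of_3
-- ===== SOURCE A (Python) =====
-- def part4_get_str_mult_of_3(num):
--     """
--     Return a string of a's and b's that answers whether a number from 0 till given num are multiples of 3
--     If a number is a multiple of 3, return 'a' for this number, and 'b' otherwise.
--     :param num: Number up to which to check (not inclusive)
--     :return: String of a's and b's, a's for all number from 0 till num that are multiples of 3, b otherwise
--     """
--     message =''
--     for number in range(num+1):
--         # add 'a' if the number is a multiple of 3, otherwise add 'b'
--         if (number % 3) == 0:
--             message = message + 'a'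
--         else:
--             message = message + 'b'
--     return message
-- ===== SOURCE B (Python) =====
-- def part4_get_str_mult_of_3(num):
--     # period-3 pattern: repeat the block 'abb' and cut it to length num+1
--     return ('abb' * (num // 3 + 1))[:num + 1]
-- ===== Notes on version B (the rewrite author's own statement) =====
-- stated objective: faster
-- what changed: Replaces the per-number loop with a modulo branch by one repetition of the period-3 block 'abb' followed by a slice to length num+1.
import Mathlib
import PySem

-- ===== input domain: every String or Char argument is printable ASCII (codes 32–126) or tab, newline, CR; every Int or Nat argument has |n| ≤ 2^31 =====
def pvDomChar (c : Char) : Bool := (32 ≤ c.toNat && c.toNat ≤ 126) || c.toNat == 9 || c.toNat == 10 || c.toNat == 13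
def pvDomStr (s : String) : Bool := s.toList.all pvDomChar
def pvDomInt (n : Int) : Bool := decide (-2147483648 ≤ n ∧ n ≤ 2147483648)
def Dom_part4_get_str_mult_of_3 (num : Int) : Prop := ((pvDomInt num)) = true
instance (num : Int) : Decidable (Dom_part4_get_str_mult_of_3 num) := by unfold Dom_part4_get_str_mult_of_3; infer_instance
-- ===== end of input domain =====

-- B builds the periodic block 'abb' once, repeats and slices it, instead of A's
-- per-number loop with a modulo test (objective: faster, linear vs quadratic appends).

-- ===== PORT A =====
-- loop 'for number in range(num+1)' appending 'a'/'b' by the modulo test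
def part4_get_str_mult_of_3 (num : Int) : String :=
  String.ofList <|
    (PySem.List.pyRange 0 (num + 1) 1).foldl
      (fun message number =>
        if PySem.Int.mod number 3 = 0 then message ++ ['a'] else message ++ ['b'])
      []

-- ===== PORT B =====
-- ('abb' * (num // 3 + 1))[:num + 1]
def part4_get_str_mult_of_3_alt (num : Int) : String :=
  String.ofList <|
    PySem.List.slice
      (PySem.List.pyRepeat ['a', 'b', 'b'] (PySem.Int.floordiv num 3 + 1))
      none (some (num + 1))

-- ===== PRECONDITION & SPEC =====
def Spec_part4_get_str_mult_of_3 (num : Int) (out : String) : Prop := out = part4_get_str_mult_of_3_alt num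
instance (num : Int) (out : String) : Decidable (Spec_part4_get_str_mult_of_3 num out) := by unfold Spec_part4_get_str_mult_of_3; infer_instance

-- ===== CLAIM (what is proved, stated in full; the proofs are below) =====
def Claim_equal_part4_get_str_mult_of_3 : Prop := ∀ (num : Int), Dom_part4_get_str_mult_of_3 num → Spec_part4_get_str_mult_of_3 num (part4_get_str_mult_of_3 num)

-- ===== LEMMAS AND PROOFS =====

-- the common pattern: for indices 0..n-1, 'a' at multiples of 3, 'b' elsewhere
def pvPattern (n : Nat) : List Char :=
  (List.range n).map (fun k => if k % 3 = 0 then 'a' else 'b')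

theorem pvPattern_flatten (m : Nat) :
    (List.replicate m ['a', 'b', 'b']).flatten = pvPattern (3 * m) := by
  induction m with
  | zero => simp [pvPattern]
  | succ m ih =>
    have h3 : 3 * (m + 1) = 3 + 3 * m := by ring
    simp only [List.replicate_succ, List.flatten_cons, ih, pvPattern, h3, List.range_add,
      List.map_append, List.map_map]
    have hmap : List.map ((fun k => if k % 3 = 0 then 'a' else 'b') ∘ fun x => 3 + x)
        (List.range (3 * m)) = List.map (fun k => if k % 3 = 0 then 'a' else 'b')
        (List.range (3 * m)) := by
      apply List.map_congr_left
      intro k _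
      have h : (3 + k) % 3 = k % 3 := by omega
      simp [Function.comp, h]
    rw [hmap,
      show List.map (fun k => if k % 3 = 0 then 'a' else 'b') (List.range 3) = ['a', 'b', 'b']
        from by decide]

theorem pvPattern_take (j n : Nat) : (pvPattern n).take j = pvPattern (min j n) := by
  simp [pvPattern, ← List.map_take, List.take_range]

-- A's loop equals the pattern of length (num+1).toNat
theorem pvA_eq_pattern (num : Int) :
    part4_get_str_mult_of_3 num = String.ofList (pvPattern (num + 1).toNat) := by
  unfold part4_get_str_mult_of_3
  congr 1
  rw [PySem.List.pyRange_one]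
  rw [show (fun (message : List Char) (number : Int) =>
        if PySem.Int.mod number 3 = 0 then message ++ ['a'] else message ++ ['b'])
      = (fun message number =>
        message ++ [if PySem.Int.mod number 3 = 0 then 'a' else 'b']) by
    funext message number; split <;> simp_all]
  rw [PySem.List.foldl_append_singleton_eq_map]
  simp only [List.nil_append, List.map_map, pvPattern]
  rw [Int.sub_zero]
  apply List.map_congr_left
  intro k _
  simp only [Function.comp, Int.zero_add]
  have : PySem.Int.mod (k : Int) 3 = ((k % 3 : Nat) : Int) := PySem.Int.mod_natCast k 3
  rw [this]
  by_cases h : k % 3 = 0 <;> simp [h] <;> try omega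

-- B equals the same pattern
theorem pvB_eq_pattern (num : Int) :
    part4_get_str_mult_of_3_alt num = String.ofList (pvPattern (num + 1).toNat) := by
  unfold part4_get_str_mult_of_3_alt
  congr 1
  have hrep : PySem.List.pyRepeat ['a','b','b'] (PySem.Int.floordiv num 3 + 1)
      = (List.replicate (PySem.Int.floordiv num 3 + 1).toNat ['a','b','b']).flatten := by
    simp [PySem.List.pyRepeat]
  by_cases hneg : num + 1 ≤ 0
  · -- num ≤ -1 : repeat count ≤ 0, the repeated block is [] and any slice of [] is []
    have hm : (PySem.Int.floordiv num 3 + 1).toNat = 0 := by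
      have h1 : PySem.Int.floordiv num 3 ≤ -1 := by
        have := PySem.Int.floordiv_eq_ediv_of_pos (a := num) (b := 3) (by omega)
        rw [this]; omega
      omega
    rw [hrep, hm]
    simp [PySem.List.slice, pvPattern, show (num + 1).toNat = 0 by omega]
  · -- num ≥ 0 : slice-to is take, pattern arithmetic
    have h01 : (0 : Int) ≤ num + 1 := by omega
    rw [PySem.List.slice_to _ h01, hrep, pvPattern_flatten, pvPattern_take]
    congr 1
    have hfd : PySem.Int.floordiv num 3 = num / 3 :=
      PySem.Int.floordiv_eq_ediv_of_pos (by omega)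
    have h0 : 0 ≤ num := by omega
    have hdiv : num < 3 * (num / 3) + 3 := by omega
    omega

-- ===== VERDICT (by name: the statement is the Claim_ definition above) =====
theorem part4_get_str_mult_of_3_spec : Claim_equal_part4_get_str_mult_of_3 := by
  intro num _
  unfold Spec_part4_get_str_mult_of_3
  rw [pvA_eq_pattern, pvB_eq_pattern]
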